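-- pv_equiv track=rewrite | github.com/Albin0903/codev | src/core/services.py | get_anti_stress_slots_order
-- ===== SOURCE A (Python) =====
-- def get_anti_stress_slots_order(total_slots):
--     """Génère les index des créneaux en partant du centre."""
--     middle = (total_slots - 1) // 2
--     order = []
--     for i in range(total_slots):
--         if i == 0:
--             order.append(middle)
--         else:
--             if middle + i < total_slots:
--                 order.append(middle + i)
--             if middle - i >= 0:
--                 order.append(middle - i)
--     return order
-- ===== SOURCE B (Python) =====
-- def get_anti_stress_slots_order(total_slots):
--     """Genere les index des creneaux en partant du centre, par tri sur la distance au centre."""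
--     middle = (total_slots - 1) // 2
--     return sorted(range(total_slots), key=lambda x: 2 * abs(x - middle) + (x < middle))
-- ===== Notes on version B (the rewrite author's own statement) =====
-- stated objective: idiomatic
-- what changed: Replaces the expanding center-outward loop with conditional appends by a single sorted() over range(total_slots) keyed on distance from the center with a right-before-left tie-break.
import Mathlib
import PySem

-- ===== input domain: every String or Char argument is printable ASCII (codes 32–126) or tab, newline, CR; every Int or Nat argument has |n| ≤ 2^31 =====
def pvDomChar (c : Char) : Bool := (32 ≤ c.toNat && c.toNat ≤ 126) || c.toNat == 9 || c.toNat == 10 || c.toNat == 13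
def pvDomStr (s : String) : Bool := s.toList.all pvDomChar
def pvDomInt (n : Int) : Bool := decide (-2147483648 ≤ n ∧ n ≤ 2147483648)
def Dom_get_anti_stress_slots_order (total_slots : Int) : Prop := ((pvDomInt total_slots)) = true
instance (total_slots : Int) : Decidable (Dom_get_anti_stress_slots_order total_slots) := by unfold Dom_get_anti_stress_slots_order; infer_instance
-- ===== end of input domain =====

-- B replaces A's expanding center-outward loop by a sort of range(total_slots) on an
-- arithmetic distance-from-center key (objective: idiomatic; not claimed faster).

-- ===== PORT A =====
def get_anti_stress_slots_order (total_slots : Int) : List Int :=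
  let middle := PySem.Int.floordiv (total_slots - 1) 2
  (PySem.List.pyRange 0 total_slots 1).foldl
    (fun order i =>
      if i == 0 then order ++ [middle]
      else
        let order := if middle + i < total_slots then order ++ [middle + i] else order
        if 0 ≤ middle - i then order ++ [middle - i] else order)
    []

-- ===== PORT B =====
def get_anti_stress_slots_order_alt (total_slots : Int) : List Int :=
  let middle := PySem.Int.floordiv (total_slots - 1) 2
  PySem.List.sorted (PySem.List.pyRange 0 total_slots 1)
    (fun x => 2 * |x - middle| + (if x < middle then 1 else 0)) false

-- ===== PRECONDITION & SPEC =====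
def Spec_get_anti_stress_slots_order (total_slots : Int) (out : List Int) : Prop := out = get_anti_stress_slots_order_alt total_slots
instance (total_slots : Int) (out : List Int) : Decidable (Spec_get_anti_stress_slots_order total_slots out) := by unfold Spec_get_anti_stress_slots_order; infer_instance

-- ===== CLAIM (what is proved, stated in full; the proofs are below) =====
def Claim_equal_get_anti_stress_slots_order : Prop := ∀ (total_slots : Int), Dom_get_anti_stress_slots_order total_slots → Spec_get_anti_stress_slots_order total_slots (get_anti_stress_slots_order total_slots)

-- ===== LEMMAS AND PROOFS =====

-- A's loop body (proof-side name for it)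
def pvStep (n middle : Int) (order : List Int) (i : Int) : List Int :=
  if i == 0 then order ++ [middle]
  else
    let order := if middle + i < n then order ++ [middle + i] else order
    if 0 ≤ middle - i then order ++ [middle - i] else order

-- A's accumulator after processing i = 0 .. k-1
def pvFold (n middle : Int) (k : Nat) : List Int :=
  ((List.range k).map (fun j : Nat => (j : Int))).foldl (pvStep n middle) []

def pvKey (middle : Int) (x : Int) : Int := 2 * |x - middle| + (if x < middle then 1 else 0)

theorem pvFold_succ (n middle : Int) (k : Nat) :
    pvFold n middle (k + 1) = pvStep n middle (pvFold n middle k) (k : Int) := by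
  simp [pvFold, List.range_succ]

-- main invariant of A's loop

theorem pvKey_right (middle i : Int) (hi : 1 ≤ i) : pvKey middle (middle + i) = 2 * i := by
  simp only [pvKey]
  rw [if_neg (by omega), abs_of_nonneg (by omega)]
  ring

theorem pvKey_left (middle i : Int) (hi : 1 ≤ i) : pvKey middle (middle - i) = 2 * i + 1 := by
  simp only [pvKey]
  rw [if_pos (by omega), abs_of_nonpos (by omega)]
  ring

-- main invariant of A's loop
theorem pvFold_inv (n middle : Int) (k : Nat) (hk : 1 ≤ k) (hm0 : 0 ≤ middle) (hmn : middle < n) :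
    (∀ x, x ∈ pvFold n middle k ↔ (0 ≤ x ∧ x < n ∧ middle - k < x ∧ x < middle + k)) ∧
      (pvFold n middle k).Pairwise (fun a b => pvKey middle a < pvKey middle b) := by
  induction k with
  | zero => omega
  | succ k ih =>
    by_cases hk1 : k = 0
    · subst hk1
      refine ⟨?_, by simp [pvFold, pvStep]⟩
      intro x
      simp only [pvFold, List.range_succ]
      simp [pvStep]
      omega
    · obtain ⟨hmem, hpair⟩ := ih (by omega)
      have hkpos : (1 : Int) ≤ (k : Int) := by exact_mod_cast Nat.one_le_iff_ne_zero.mpr hk1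
      have hstep : pvFold n middle (k + 1)
          = (pvFold n middle k)
            ++ ((if middle + (k : Int) < n then [middle + (k : Int)] else [])
                ++ (if 0 ≤ middle - (k : Int) then [middle - (k : Int)] else [])) := by
        rw [pvFold_succ]
        have hne : ((k : Int) == 0) = false := by simp; omega
        simp only [pvStep, hne, Bool.false_eq_true, if_false]
        split_ifs <;> simp
      have hkeyhi : ∀ x ∈ pvFold n middle k, pvKey middle x < 2 * (k : Int) := by
        intro x hx
        obtain ⟨h1, h2, h3, h4⟩ := (hmem x).mp hx
        simp only [pvKey]
        rcases le_or_gt middle x with h | h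
        · rw [abs_of_nonneg (by omega), if_neg (by omega)]; omega
        · rw [abs_of_neg (by omega), if_pos (by omega)]; omega
      have hkeylo : ∀ x, x ∈ ((if middle + (k : Int) < n then [middle + (k : Int)] else [])
                ++ (if 0 ≤ middle - (k : Int) then [middle - (k : Int)] else [])) →
          2 * (k : Int) ≤ pvKey middle x := by
        intro x hx
        simp only [List.mem_append] at hx
        rcases hx with hx | hx <;> split_ifs at hx <;> simp at hx <;> subst hx
        · rw [pvKey_right middle _ (by omega)]
        · rw [pvKey_left middle _ (by omega)]; omega
      constructor
      · intro x
        rw [hstep]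
        simp only [List.mem_append, hmem]
        constructor
        · rintro (h | h | h)
          · omega
          · split_ifs at h <;> simp at h <;> omega
          · split_ifs at h <;> simp at h <;> omega
        · intro h
          by_cases hd : middle - (k : Int) < x ∧ x < middle + (k : Int)
          · left; exact ⟨h.1, h.2.1, hd.1, hd.2⟩
          · right
            rcases le_or_gt middle x with hx | hx
            · have hxe : x = middle + (k : Int) := by omega
              left; subst hxe; rw [if_pos h.2.1]; simp
            · have hxe : x = middle - (k : Int) := by omega
              right; rw [if_pos (by omega)]; simp; omega
      · rw [hstep]
        apply List.pairwise_append.mpr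
        refine ⟨hpair, ?_, ?_⟩
        · apply List.pairwise_append.mpr
          refine ⟨by split_ifs <;> simp, by split_ifs <;> simp, ?_⟩
          intro a ha b hb
          split_ifs at ha hb <;> simp_all
          subst ha; subst hb
          rw [pvKey_right middle _ (by omega), pvKey_left middle _ (by omega)]
          omega
        · intro a ha b hb
          exact lt_of_lt_of_le (hkeyhi a ha) (hkeylo b hb)

theorem get_anti_stress_slots_order_spec : Claim_equal_get_anti_stress_slots_order := by
  intro n _
  unfold Spec_get_anti_stress_slots_order
  by_cases hn : n ≤ 0
  · have h0 : (n - 0).toNat = 0 := by omega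
    have hr : PySem.List.pyRange 0 n 1 = [] := by
      rw [PySem.List.pyRange_one, h0]; rfl
    simp only [get_anti_stress_slots_order, get_anti_stress_slots_order_alt, hr]
    rfl
  · replace hn : 0 < n := by omega
    set middle := PySem.Int.floordiv (n - 1) 2 with hmdef
    have hm : 0 ≤ middle ∧ middle < n := by
      rw [hmdef, PySem.Int.floordiv_eq_ediv_of_pos (by omega)]
      omega
    have hA : get_anti_stress_slots_order n = pvFold n middle n.toNat := by
      simp only [get_anti_stress_slots_order, pvFold, ← hmdef,
        PySem.List.pyRange_one, Int.sub_zero, zero_add]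
      rfl
    obtain ⟨hmem, hpair⟩ := pvFold_inv n middle n.toNat (by omega) hm.1 hm.2
    have hnd : (pvFold n middle n.toNat).Nodup := by
      exact hpair.imp (fun h heq => absurd (heq ▸ h) (lt_irrefl _))
    have hperm : (pvFold n middle n.toNat).Perm (PySem.List.pyRange 0 n 1) := by
      rw [List.perm_ext_iff_of_nodup hnd (PySem.List.nodup_pyRange_one 0 n)]
      intro x
      rw [hmem, PySem.List.mem_pyRange_one]
      omega
    rw [hA, get_anti_stress_slots_order_alt, ← hmdef]
    exact Eq.symm (PySem.List.sorted_eq_of_perm_of_pairwise_lt _ _ _ hperm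
      (by simpa only [pvKey] using hpair))
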